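-- pv_equiv track=rewrite | github.com/atamelo/python-algo | recursion/split_number_series2.py | all_parts
-- ===== SOURCE A (Python) =====
-- def all_parts(digits):
--
--     def build_part(digits, start_index, parts, combinations):
--
--         if start_index == len(digits):
--             combinations.append(list(parts))
--             return
--
--         for i in range(len(digits) - start_index):
--             end_index = start_index + i + 1
--             part = digits[start_index:end_index]
--             parts.append(part)
--             build_part(digits, end_index, parts, combinations)
--             parts.pop(len(parts) - 1)
--
--     combinations = []
--     build_part(digits, 0, [], combinations)
--     return combinations
-- ===== SOURCE B (Python) =====
-- def all_parts(digits):
--     if not digits: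
--         return [[]]
--     out = []
--     for i in range(1, len(digits) + 1):
--         first = digits[:i]
--         for rest in all_parts(digits[i:]):
--             out.append([first] + rest)
--     return out
-- ===== Notes on version B (the rewrite author's own statement) =====
-- stated objective: simpler
-- what changed: Replaced the accumulator/backtracking recursion (mutable parts list with append/pop and an out-parameter combinations) by a direct recursion that returns the list of splits: base case [[]] for the empty string, otherwise prepend each prefix to every split of the remaining suffix.
import Mathlib
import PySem

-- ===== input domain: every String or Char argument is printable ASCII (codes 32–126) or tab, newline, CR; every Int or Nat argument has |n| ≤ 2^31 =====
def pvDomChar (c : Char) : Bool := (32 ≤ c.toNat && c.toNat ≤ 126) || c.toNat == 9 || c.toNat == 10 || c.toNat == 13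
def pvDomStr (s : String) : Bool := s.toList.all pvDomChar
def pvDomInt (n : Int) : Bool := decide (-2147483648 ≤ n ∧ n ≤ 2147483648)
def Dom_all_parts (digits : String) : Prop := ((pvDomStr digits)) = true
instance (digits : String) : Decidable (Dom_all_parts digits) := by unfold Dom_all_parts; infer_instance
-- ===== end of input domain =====

-- B replaces A's backtracking accumulator recursion (mutable parts with append/pop and an
-- out-parameter) by a direct recursion returning the list of splits; same cost, simpler shape.

-- ===== PORT A =====
-- build_part: the recursive helper; 'parts.append/…/pop' is modelled by passing parts ++ [part]
-- to the recursive call (the net effect of append, recurse, pop); 'combinations.append' is the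
-- accumulator result.
def buildPart (cs : List Char) (start : Nat) (parts : List String)
    (combs : List (List String)) : List (List String) :=
  if start = cs.length then
    combs ++ [parts]
  else
    (List.range (cs.length - start)).attach.foldl
      (fun acc ⟨i, hi⟩ =>
        let endIdx := start + i + 1
        let part := String.mk (PySem.List.slice cs (some (start : Int)) (some (endIdx : Int)))
        buildPart cs endIdx (parts ++ [part]) acc)
      combs
termination_by cs.length - start
decreasing_by
  have : i < cs.length - start := List.mem_range.mp hi
  omega

def all_parts (digits : String) : List (List String) :=
  buildPart digits.toList 0 [] []

-- ===== PORT B =====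
def splitsB (cs : List Char) : List (List String) :=
  if h : cs = [] then
    [[]]
  else
    (List.range cs.length).flatMap
      (fun i => (splitsB (cs.drop (i + 1))).map
        (fun rest => String.mk (cs.take (i + 1)) :: rest))
termination_by cs.length
decreasing_by
  have : cs.length ≠ 0 := fun h0 => h (List.eq_nil_of_length_eq_zero h0)
  simp [List.length_drop]; omega

def all_parts_alt (digits : String) : List (List String) :=
  splitsB digits.toList

-- ===== PRECONDITION & SPEC =====
def Spec_all_parts (digits : String) (out : List (List String)) : Prop := out = all_parts_alt digits
instance (digits : String) (out : List (List String)) : Decidable (Spec_all_parts digits out) := by unfold Spec_all_parts; infer_instance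

-- ===== CLAIM (what is proved, stated in full; the proofs are below) =====
def Claim_equal_all_parts : Prop := ∀ (digits : String), Dom_all_parts digits → Spec_all_parts digits (all_parts digits)

-- ===== LEMMAS AND PROOFS =====

theorem splitsB_cons (cs : List Char) (h : cs ≠ []) :
    splitsB cs = (List.range cs.length).flatMap
      (fun i => (splitsB (cs.drop (i + 1))).map
        (fun rest => String.mk (cs.take (i + 1)) :: rest)) := by
  rw [splitsB]; simp [h]

theorem foldl_step_flatMap {α β : Type} (f : List β → α → List β) (g : α → List β)
    (hf : ∀ acc x, f acc x = acc ++ g x) :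
    ∀ (l : List α) (acc : List β), l.foldl f acc = acc ++ l.flatMap g := by
  intro l
  induction l with
  | nil => intro acc; simp
  | cons x t iht => intro acc; rw [List.foldl_cons, hf, iht]; simp

theorem buildPart_eq (n : Nat) (cs : List Char) (start : Nat) (hle : start ≤ cs.length)
    (hn : cs.length - start ≤ n) (parts : List String) (combs : List (List String)) :
    buildPart cs start parts combs
      = combs ++ (splitsB (cs.drop start)).map (fun r => parts ++ r) := by
  induction n generalizing start parts combs with
  | zero =>
      have hstart : start = cs.length := by omega
      rw [buildPart]
      simp [hstart, splitsB]
  | succ n ih =>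
      by_cases hs : start = cs.length
      · rw [buildPart]
        simp [hs, splitsB]
      · have hlt : start < cs.length := lt_of_le_of_ne hle hs
        rw [buildPart]
        simp only [hs, if_false]
        have hne : cs.drop start ≠ [] := by
          intro h0
          have := congrArg List.length h0
          simp only [List.length_drop, List.length_nil] at this
          omega
        rw [splitsB_cons _ hne]
        rw [foldl_step_flatMap _
          (fun p : {i // i ∈ List.range (cs.length - start)} =>
            (splitsB (cs.drop (start + p.1 + 1))).map
              (fun rest => parts ++ (String.mk ((cs.drop start).take (p.1 + 1)) :: rest)))
          ?hf]
        case hf =>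
          intro acc p
          obtain ⟨i, hi⟩ := p
          have hi' : i < cs.length - start := List.mem_range.mp hi
          simp only
          rw [ih (start + i + 1) (by omega) (by omega)]
          have htake : PySem.List.slice cs (some (start : Int)) (some ((start + i + 1 : Nat) : Int))
              = (cs.drop start).take (i + 1) := by
            rw [PySem.List.slice_natCast cs start (start + i + 1)]
            congr 1
            omega
          rw [htake]
          congr 1
          apply List.map_congr_left
          intro r _
          simp
        · -- combine: attach-flatMap = plain flatMap, and push the outer map inside
          congr 1
          have hg : ((List.range (cs.length - start)).attach.flatMap
              (fun p : {i // i ∈ List.range (cs.length - start)} =>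
                (splitsB (cs.drop (start + p.1 + 1))).map
                  (fun rest => parts ++ (String.mk ((cs.drop start).take (p.1 + 1)) :: rest))))
              = (List.range (cs.length - start)).flatMap
              (fun i =>
                (splitsB (cs.drop (start + i + 1))).map
                  (fun rest => parts ++ (String.mk ((cs.drop start).take (i + 1)) :: rest))) := by
            conv_rhs => rw [← List.attach_map_subtype_val (List.range (cs.length - start))]
            rw [List.flatMap_map]
          rw [hg]
          simp only [List.length_drop, List.map_flatMap, List.map_map]
          congr 1
          funext i
          have h3 : start + (i + 1) = start + i + 1 := by omega
          rw [List.drop_drop, h3]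
          apply List.map_congr_left
          intro r _
          simp

-- ===== VERDICT (by name: the statement is the Claim_ definition above) =====
theorem all_parts_spec : Claim_equal_all_parts := by
  intro digits _
  unfold Spec_all_parts all_parts all_parts_alt
  rw [buildPart_eq digits.toList.length _ 0 (Nat.zero_le _) (by omega)]
  simp
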